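-- pv_equiv track=rewrite | github.com/AmbyFaust/VK_Algorithms | 3/kserox.py | copy_time
-- ===== SOURCE A (Python) =====
-- def copy_time(n, x, y):
--     if x > y:
--         x, y = y, x
--
--     left, right = x, n * x
--
--     while left < right:
--         mid = (left + right) // 2
--
--         if (mid // x) + (mid // y) >= n + 1:
--             right = mid
--         else:
--             left = mid + 1
--
--     return left
-- ===== SOURCE B (Python) =====
-- def copy_time(n, x, y):
--     # Closed form: the count t//x + t//y jumps only at multiples of x or y,
--     # so the least t with t//x + t//y >= n + 1 is the smaller of the least
--     # such multiple of x and of y, each given by one ceiling division.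
--     s = x + y
--     c = n + 1
--     t = min(x * (-(-c * y // s)), y * (-(-c * x // s)))
--     m = x if x <= y else y
--     return max(m, min(t, n * m))
-- ===== Notes on version B (the rewrite author's own statement) =====
-- stated objective: faster
-- what changed: Replaces A's binary search over [min, n*min] by a closed form: the least t with t//x + t//y >= n+1 is the smaller of the least qualifying multiple of x and of y, each one ceiling division, then clamped into A's range; Pre_ excludes non-positive speeds with n <= 0 (A's bisection there runs over a non-monotone predicate, so its value - or ZeroDivisionError - is an accident of the probe sequence) and x + y = 0 (where B's closed form divides by zero).
-- outside the precondition, e.g. on copy_time(-2, -3, -3): A returns 6, B returns 0; on copy_time(-2, -1, 2): A returns -1, B returns 2; on copy_time(3, -4, 4): A returns -4, B raises ZeroDivisionError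
import Mathlib
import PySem

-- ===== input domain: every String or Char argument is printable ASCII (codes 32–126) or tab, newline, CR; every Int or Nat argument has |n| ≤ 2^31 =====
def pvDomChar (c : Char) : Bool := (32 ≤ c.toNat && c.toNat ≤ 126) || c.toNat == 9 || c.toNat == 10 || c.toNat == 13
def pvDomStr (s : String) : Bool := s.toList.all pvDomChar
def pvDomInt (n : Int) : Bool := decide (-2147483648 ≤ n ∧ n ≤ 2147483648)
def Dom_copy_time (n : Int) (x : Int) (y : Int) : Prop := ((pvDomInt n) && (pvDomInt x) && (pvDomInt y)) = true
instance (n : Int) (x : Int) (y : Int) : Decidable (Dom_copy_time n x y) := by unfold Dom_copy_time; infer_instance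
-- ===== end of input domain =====

-- B replaces A's binary search by a closed form: two ceiling divisions give the least t with t//x + t//y >= n+1, clamped into A's range (constant number of arithmetic operations).

-- ===== PORT A =====
-- the while-loop of A: bisect [left, right] on the predicate mid//x + mid//y >= n+1
def copyLoop (n : Int) (x : Int) (y : Int) (left : Int) (right : Int) : Int :=
  if h : left < right then
    let mid := PySem.Int.floordiv (left + right) 2
    if PySem.Int.floordiv mid x + PySem.Int.floordiv mid y ≥ n + 1 then
      copyLoop n x y left mid
    else
      copyLoop n x y (mid + 1) right
  else
    left
termination_by (right - left).toNat
decreasing_by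
  · have h2 : PySem.Int.floordiv (left + right) 2 = (left + right) / 2 :=
      PySem.Int.floordiv_eq_ediv_of_pos (by norm_num)
    simp only [h2] at *
    omega
  · have h2 : PySem.Int.floordiv (left + right) 2 = (left + right) / 2 :=
      PySem.Int.floordiv_eq_ediv_of_pos (by norm_num)
    simp only [h2] at *
    omega

def copy_time (n : Int) (x : Int) (y : Int) : Int :=
  -- 'if x > y: x, y = y, x' then 'left, right = x, n*x' and the while loop
  if x > y then copyLoop n y x y (n * y) else copyLoop n x y x (n * x)

-- ===== PORT B =====
def copy_time_alt (n : Int) (x : Int) (y : Int) : Int :=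
  let s := x + y
  let c := n + 1
  let t := min (x * (-(PySem.Int.floordiv (-c * y) s)))
               (y * (-(PySem.Int.floordiv (-c * x) s)))
  let m := if x ≤ y then x else y
  max m (min t (n * m))

-- ===== PRECONDITION & SPEC =====
-- Pre_ excludes non-positive speeds together with n ≤ 0 (there A's bisection runs over a
-- non-monotone predicate, so its value — or its ZeroDivisionError — is an accident of the
-- probe sequence) and x + y = 0 (where B's closed form divides by zero).
def Pre_copy_time (n : Int) (x : Int) (y : Int) : Prop :=
  (1 ≤ x ∧ 1 ≤ y) ∨ (1 ≤ n ∧ (x ≤ 0 ∨ y ≤ 0) ∧ x + y ≠ 0)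
instance (n : Int) (x : Int) (y : Int) : Decidable (Pre_copy_time n x y) := by
  unfold Pre_copy_time; infer_instance

def pvWitness_copy_time : Int × Int × Int := (4, 2, 3)

def Spec_copy_time (n : Int) (x : Int) (y : Int) (out : Int) : Prop := out = copy_time_alt n x y
instance (n : Int) (x : Int) (y : Int) (out : Int) : Decidable (Spec_copy_time n x y out) := by
  unfold Spec_copy_time; infer_instance

-- ===== CLAIM (what is proved, stated in full; the proofs are below) =====
def Claim_equal_copy_time : Prop := ∀ (n : Int) (x : Int) (y : Int), Dom_copy_time n x y → Pre_copy_time n x y → Spec_copy_time n x y (copy_time n x y)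

-- ===== LEMMAS AND PROOFS =====

-- floor division by a positive divisor is monotone
lemma fd_mono {b : Int} (hb : 0 < b) {a a' : Int} (h : a ≤ a') :
    PySem.Int.floordiv a b ≤ PySem.Int.floordiv a' b := by
  rw [PySem.Int.floordiv_eq_ediv_of_pos hb, PySem.Int.floordiv_eq_ediv_of_pos hb]
  exact Int.ediv_le_ediv hb h

-- characterization: with x, y ≥ 1, the predicate n+1 ≤ t//x + t//y holds iff T ≤ t,
-- where T = min(x * ceil((n+1)y / (x+y)), y * ceil((n+1)x / (x+y)))
lemma charP (n x y : Int) (hx : 1 ≤ x) (hy : 1 ≤ y) (t : Int) :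
    (n + 1 ≤ PySem.Int.floordiv t x + PySem.Int.floordiv t y) ↔
      (min (x * (-(PySem.Int.floordiv (-(n + 1) * y) (x + y))))
           (y * (-(PySem.Int.floordiv (-(n + 1) * x) (x + y)))) ≤ t) := by
  have hx0 : (0 : Int) < x := by omega
  have hy0 : (0 : Int) < y := by omega
  have hs : (0 : Int) < x + y := by omega
  simp only [neg_mul]
  set a := -(PySem.Int.floordiv (-((n + 1) * y)) (x + y)) with hadef
  set b := -(PySem.Int.floordiv (-((n + 1) * x)) (x + y)) with hbdef
  have ha : (a - 1) * (x + y) < (n + 1) * y ∧ (n + 1) * y ≤ a * (x + y) :=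
    (PySem.Int.neg_floordiv_neg_eq_iff_of_pos hs).mp hadef.symm
  have hb : (b - 1) * (x + y) < (n + 1) * x ∧ (n + 1) * x ≤ b * (x + y) :=
    (PySem.Int.neg_floordiv_neg_eq_iff_of_pos hs).mp hbdef.symm
  constructor
  · intro hP
    by_contra hc
    push Not at hc
    rcases lt_min_iff.mp hc with ⟨h1, h2⟩
    have f1 : PySem.Int.floordiv t x < a :=
      (PySem.Int.floordiv_lt_iff_lt_mul hx0).mpr (by nlinarith)
    have f2 : PySem.Int.floordiv t y < b :=
      (PySem.Int.floordiv_lt_iff_lt_mul hy0).mpr (by nlinarith)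
    have hsum : (a + b - 2) * (x + y) < (n + 1) * (x + y) := by nlinarith [ha.1, hb.1]
    have hab : a + b - 2 < n + 1 := by nlinarith [hsum, hs]
    linarith
  · intro hT
    rcases min_le_iff.mp hT with h | h
    · have fa : PySem.Int.floordiv (x * a) x = a :=
        (PySem.Int.floordiv_eq_iff_of_pos hx0).mpr ⟨by nlinarith, by nlinarith⟩
      have fb : (n + 1) - a ≤ PySem.Int.floordiv (x * a) y :=
        (PySem.Int.le_floordiv_iff_mul_le hy0).mpr (by nlinarith [ha.2])
      have m1 := fd_mono hx0 h
      have m2 := fd_mono hy0 h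
      linarith [fa ▸ m1, m2, fb]
    · have fa : PySem.Int.floordiv (y * b) y = b :=
        (PySem.Int.floordiv_eq_iff_of_pos hy0).mpr ⟨by nlinarith, by nlinarith⟩
      have fb : (n + 1) - b ≤ PySem.Int.floordiv (y * b) x :=
        (PySem.Int.le_floordiv_iff_mul_le hx0).mpr (by nlinarith [hb.2])
      have m1 := fd_mono hy0 h
      have m2 := fd_mono hx0 h
      linarith [fa ▸ m1, m2, fb]

-- the bisection loop computes the clamp of T into [l, r]
lemma bs_eq (n x y T : Int)
    (hchar : ∀ t, (n + 1 ≤ PySem.Int.floordiv t x + PySem.Int.floordiv t y) ↔ T ≤ t) :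
    ∀ k : Nat, ∀ l r : Int, (r - l).toNat ≤ k → l ≤ r →
      copyLoop n x y l r = max l (min T r) := by
  intro k
  induction k with
  | zero =>
    intro l r hk hlr
    have hlr' : l = r := by omega
    subst hlr'
    rw [copyLoop]
    simp only [lt_irrefl, dite_false]
    omega
  | succ k ih =>
    intro l r hk hlr
    rw [copyLoop]
    by_cases hlt : l < r
    · simp only [hlt, dite_true]
      have h2 : PySem.Int.floordiv (l + r) 2 = (l + r) / 2 :=
        PySem.Int.floordiv_eq_ediv_of_pos (by norm_num)
      set mid := PySem.Int.floordiv (l + r) 2 with hmid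
      have hb : l ≤ mid ∧ mid < r := by rw [h2]; omega
      by_cases hp : PySem.Int.floordiv mid x + PySem.Int.floordiv mid y ≥ n + 1
      · rw [if_pos hp, ih l mid (by omega) (by omega)]
        have hT : T ≤ mid := (hchar mid).mp hp
        omega
      · rw [if_neg hp, ih (mid + 1) r (by omega) (by omega)]
        have hT : mid < T := by
          by_contra hc
          exact hp ((hchar mid).mpr (by omega))
        omega
    · simp only [hlt, dite_false]
      have : l = r := by omega
      omega

lemma alt_symm (n x y : Int) : copy_time_alt n x y = copy_time_alt n y x := by
  simp only [copy_time_alt]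
  have hm : (if y ≤ x then y else x) = (if x ≤ y then x else y) := by split_ifs <;> omega
  rw [add_comm y x, hm,
    min_comm (y * -PySem.Int.floordiv (-(n + 1) * x) (x + y))
      (x * -PySem.Int.floordiv (-(n + 1) * y) (x + y))]

-- the sorted positive case
lemma eq_on_pos (n x y : Int) (hx : 1 ≤ x) (hy : 1 ≤ y) (hxy : x ≤ y) :
    copyLoop n x y x (n * x) = copy_time_alt n x y := by
  simp only [copy_time_alt, if_pos hxy]
  by_cases hc : x ≤ n * x
  · rw [bs_eq n x y _ (charP n x y hx hy) (n * x - x).toNat x (n * x) le_rfl hc]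
  · rw [copyLoop]
    simp only [show ¬(x < n * x) by omega, dite_false]
    exact (max_eq_left (le_trans (min_le_right _ _) (by omega))).symm

-- ===== VERDICT (by name: the statement is the Claim_ definition above) =====
theorem copy_time_spec : Claim_equal_copy_time := by
  intro n x y _hdom hpre
  unfold Spec_copy_time
  rcases hpre with ⟨hx, hy⟩ | ⟨hn, hm, hs⟩
  · unfold copy_time
    by_cases hxy : x > y
    · rw [if_pos hxy, eq_on_pos n y x hy hx (le_of_lt hxy), alt_symm]
    · rw [if_neg hxy, eq_on_pos n x y hx hy (not_lt.mp hxy)]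
  · -- n ≥ 1 and min(x,y) ≤ 0: A's loop is never entered and both sides return min(x,y)
    unfold copy_time
    simp only [copy_time_alt]
    by_cases hxy : x > y
    · have hy0 : y ≤ 0 := by omega
      have hnm : n * y ≤ y := by nlinarith
      rw [if_pos hxy, copyLoop]
      simp only [show ¬(y < n * y) from not_lt.mpr hnm, dite_false,
        show ¬(x ≤ y) by omega, if_false]
      exact (max_eq_left (le_trans (min_le_right _ _) hnm)).symm
    · have hx0 : x ≤ 0 := by omega
      have hnm : n * x ≤ x := by nlinarith
      rw [if_neg hxy, copyLoop]
      simp only [show x ≤ y by omega, if_true,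
        show ¬(x < n * x) from not_lt.mpr hnm, dite_false]
      exact (max_eq_left (le_trans (min_le_right _ _) hnm)).symm
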